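-- pv_equiv track=rewrite | github.com/Vidyasagar-Dadilwar/Design-Patterns | Codes(15.09.24)/2(Minesweeper).py | solve
-- ===== SOURCE A (Python) =====
-- def cnt(field, row, col, n, m):
--     dir = [(-1, 0), (1, 0), (0, -1), (0, 1), (-1, -1), (-1, 1), (1, -1), (1, 1)]
--     mineCnt = 0
--
--     for dr, dc in dir:
--         nr, nc = row + dr, col + dc
--         if 0 <= nr < n and 0 <= nc < m and field[nr][nc] == '*':
--             mineCnt += 1
--
--     return mineCnt
--
-- def solve(field, n, m):
--     result = []
--
--     for i in range(n):
--         l = []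
--         for j in range(m):
--             if field[i][j] == '*':
--                 l.append('*')
--             else:
--                 mineCnt = cnt(field, i, j, n, m)
--                 l.append(str(mineCnt))
--         result.append("".join(l))
--
--     return result
-- ===== SOURCE B (Python) =====
-- def solve(field, n, m):
--     # Mine-driven scatter: collect one "bump" per (mine, in-bounds neighbour) pair,
--     # tally them in a dict, then render each row (mines print '*').
--     bumps = [(i + dr, j + dc)
--              for i in range(n)
--              for j in range(m)
--              if field[i][j] == '*'
--              for dr in (-1, 0, 1)
--              for dc in (-1, 0, 1)
--              if 0 <= i + dr < n and 0 <= j + dc < m]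
--     counts = {}
--     for p in bumps:
--         counts[p] = counts.get(p, 0) + 1
--     result = []
--     for i in range(n):
--         result.append("".join('*' if field[i][j] == '*' else str(counts.get((i, j), 0))
--                               for j in range(m)))
--     return result
-- ===== Notes on version B (the rewrite author's own statement) =====
-- stated objective: alternative
-- what changed: Replaces A's per-cell 8-direction gather (cnt called for every non-mine cell) with a mine-driven scatter: one pass collects a bump for each (mine, in-bounds neighbour) pair into a dict counter, then a rendering pass prints '*' or the tallied count.
import Mathlib
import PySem

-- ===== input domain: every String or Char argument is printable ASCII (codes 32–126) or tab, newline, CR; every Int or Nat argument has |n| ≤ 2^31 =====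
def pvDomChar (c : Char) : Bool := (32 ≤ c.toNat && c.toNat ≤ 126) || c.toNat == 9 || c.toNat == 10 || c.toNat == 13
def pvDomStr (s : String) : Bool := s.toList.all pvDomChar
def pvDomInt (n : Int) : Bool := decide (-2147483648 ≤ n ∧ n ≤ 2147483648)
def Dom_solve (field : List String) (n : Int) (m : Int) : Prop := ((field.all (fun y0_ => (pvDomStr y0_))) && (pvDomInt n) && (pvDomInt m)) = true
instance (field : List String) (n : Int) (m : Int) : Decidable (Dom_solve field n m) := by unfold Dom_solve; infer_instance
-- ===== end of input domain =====

-- B replaces A's per-cell 8-direction gather with a mine-driven scatter into a dict counter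
-- plus a separate rendering pass; the theorem states equal output wherever Python A returns.

-- field[i][j] as a total function; Pre_solve keeps every access either Python makes in range,
-- and there this equals Python's indexing exactly.
def pvCell (field : List String) (i j : Int) : Char :=
  PySem.List.pyGetD (PySem.List.pyGetD field i "").toList j ' '

-- ===== PORT A =====
def pvDirs : List (Int × Int) :=
  [(-1, 0), (1, 0), (0, -1), (0, 1), (-1, -1), (-1, 1), (1, -1), (1, 1)]

def cnt (field : List String) (row col n m : Int) : Int :=
  pvDirs.foldl (fun mineCnt d =>
    if 0 ≤ row + d.1 ∧ row + d.1 < n ∧ 0 ≤ col + d.2 ∧ col + d.2 < m ∧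
        pvCell field (row + d.1) (col + d.2) = '*'
    then mineCnt + 1 else mineCnt) 0

def solve (field : List String) (n : Int) (m : Int) : List String :=
  (PySem.List.pyRange 0 n 1).foldl (fun result i =>
    result ++ [PySem.Str.join "" ((PySem.List.pyRange 0 m 1).foldl (fun l j =>
      l ++ [if pvCell field i j = '*' then "*" else PySem.Int.toStr (cnt field i j n m)]) [])]) []

-- ===== PORT B =====
def pvOffs : List Int := [-1, 0, 1]

-- the comprehension building `bumps`: one entry per (mine, in-bounds neighbour) pair
def pvBumps (field : List String) (n m : Int) : List (Int × Int) :=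
  (PySem.List.pyRange 0 n 1).flatMap (fun i =>
    (PySem.List.pyRange 0 m 1).flatMap (fun j =>
      if pvCell field i j = '*' then
        pvOffs.flatMap (fun dr => pvOffs.flatMap (fun dc =>
          if 0 ≤ i + dr ∧ i + dr < n ∧ 0 ≤ j + dc ∧ j + dc < m
          then [(i + dr, j + dc)] else []))
      else []))

def solve_alt (field : List String) (n : Int) (m : Int) : List String :=
  let counts : PySem.Dict (Int × Int) Int :=
    (pvBumps field n m).foldl (fun d p => d.insert p (d.getD p 0 + 1)) PySem.Dict.empty
  (PySem.List.pyRange 0 n 1).foldl (fun result i =>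
    result ++ [PySem.Str.join "" ((PySem.List.pyRange 0 m 1).map (fun j =>
      if pvCell field i j = '*' then "*" else PySem.Int.toStr (counts.getD (i, j) 0)))]) []

-- ===== PRECONDITION & SPEC =====
-- Pre_solve is exactly where Python A returns: either m ≤ 0 (no cell is ever indexed) or
-- every field[i][j] access with 0 ≤ i < n, 0 ≤ j < m is in range (otherwise A raises IndexError).
def Pre_solve (field : List String) (n : Int) (m : Int) : Prop :=
  m ≤ 0 ∨ (n ≤ (field.length : Int) ∧ ∀ s ∈ field.take n.toNat, m ≤ (s.toList.length : Int))
instance (field : List String) (n : Int) (m : Int) : Decidable (Pre_solve field n m) := by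
  unfold Pre_solve; infer_instance

def pvWitness_solve : List String × Int × Int := (["*1*", "232", "1*1"], 3, 3)

def Spec_solve (field : List String) (n : Int) (m : Int) (out : List String) : Prop :=
  out = solve_alt field n m
instance (field : List String) (n : Int) (m : Int) (out : List String) :
    Decidable (Spec_solve field n m out) := by unfold Spec_solve; infer_instance

-- ===== CLAIM (what is proved, stated in full; the proofs are below) =====
def Claim_equal_solve : Prop := ∀ (field : List String) (n : Int) (m : Int),
  Dom_solve field n m → Pre_solve field n m → Spec_solve field n m (solve field n m)

-- ===== LEMMAS AND PROOFS =====

-- one gather atom of A: is the neighbour at offset (dr, dc) an in-bounds mine?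
def pvAtom (field : List String) (n m i j dr dc : Int) : Nat :=
  if 0 ≤ i + dr ∧ i + dr < n ∧ 0 ≤ j + dc ∧ j + dc < m ∧
      pvCell field (i + dr) (j + dc) = '*' then 1 else 0

-- one scatter term of B: does the mine at (r, c) bump cell (i, j) via offset (dr, dc)?
def pvT (field : List String) (n m i j dr dc r c : Int) : Nat :=
  if pvCell field r c = '*' ∧ (0 ≤ r + dr ∧ r + dr < n ∧ 0 ≤ c + dc ∧ c + dc < m) ∧
      r + dr = i ∧ c + dc = j then 1 else 0

-- summing a Kronecker delta over range(N) picks the single matching index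
lemma pvDeltaNat (N : Nat) (t : Int) (g : Int → Nat) :
    ((List.range N).map (fun (k : Nat) => if (k : Int) = t then g (k : Int) else 0)).sum
      = if 0 ≤ t ∧ t < (N : Int) then g t else 0 := by
  induction N with
  | zero => rw [if_neg (by omega)]; simp
  | succ n ih =>
    rw [List.range_succ, List.map_append, List.sum_append, ih]
    simp only [List.map_cons, List.map_nil, List.sum_cons, List.sum_nil]
    by_cases h : (n : Int) = t
    · rw [if_neg (by omega), if_pos (by omega), if_pos (by omega), ← h]
      simp
    · rw [if_neg h]
      by_cases h2 : 0 ≤ t ∧ t < (n : Int)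
      · rw [if_pos h2, if_pos (by omega)]; omega
      · rw [if_neg h2, if_neg (by omega)]; omega

lemma pvDelta (b t : Int) (g : Int → Nat) :
    ((PySem.List.pyRange 0 b 1).map (fun r => if r = t then g r else 0)).sum
      = if 0 ≤ t ∧ t < b then g t else 0 := by
  rw [PySem.List.pyRange_one]
  simp only [List.map_map, Function.comp_def, zero_add, Int.sub_zero]
  rw [pvDeltaNat b.toNat t g]
  by_cases hb : 0 ≤ b
  · rw [Int.toNat_of_nonneg hb]
  · rw [if_neg (by omega), if_neg (by omega)]

-- full-grid sum of B's scatter terms for a fixed offset = A's gather atom for the negated offset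
lemma pvColSum (field : List String) (n m i j dr dc : Int)
    (hi : 0 ≤ i ∧ i < n) (hj : 0 ≤ j ∧ j < m) :
    ((PySem.List.pyRange 0 n 1).map (fun r =>
      ((PySem.List.pyRange 0 m 1).map (fun c => pvT field n m i j dr dc r c)).sum)).sum
      = pvAtom field n m i j (-dr) (-dc) := by
  have hinner : ∀ r : Int,
      ((PySem.List.pyRange 0 m 1).map (fun c => pvT field n m i j dr dc r c)).sum
        = if 0 ≤ j - dc ∧ j - dc < m then
            (if pvCell field r (j - dc) = '*' ∧ (0 ≤ r + dr ∧ r + dr < n) ∧ r + dr = i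
             then 1 else 0) else 0 := by
    intro r
    have e : (fun c => pvT field n m i j dr dc r c)
        = (fun c => if c = j - dc then
            (if pvCell field r c = '*' ∧ (0 ≤ r + dr ∧ r + dr < n) ∧ r + dr = i
             then 1 else 0) else 0) := by
      funext c
      unfold pvT
      by_cases hc : c = j - dc
      · subst hc
        rw [if_pos rfl]
        by_cases hP : pvCell field r (j - dc) = '*' ∧ (0 ≤ r + dr ∧ r + dr < n) ∧ r + dr = i
        · rw [if_pos ⟨hP.1, ⟨hP.2.1.1, hP.2.1.2, by omega, by omega⟩, hP.2.2, by omega⟩, if_pos hP]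
        · rw [if_neg (by intro h; exact hP ⟨h.1, ⟨h.2.1.1, h.2.1.2.1⟩, h.2.2.1⟩), if_neg hP]
      · rw [if_neg (by intro h; exact hc (by omega)), if_neg hc]
    rw [e, pvDelta]
  rw [show (fun r => ((PySem.List.pyRange 0 m 1).map (fun c => pvT field n m i j dr dc r c)).sum)
      = fun r => if 0 ≤ j - dc ∧ j - dc < m then
            (if pvCell field r (j - dc) = '*' ∧ (0 ≤ r + dr ∧ r + dr < n) ∧ r + dr = i
             then 1 else 0) else 0 from funext hinner]
  by_cases hb : 0 ≤ j - dc ∧ j - dc < m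
  · simp only [if_pos hb]
    have e2 : (fun r => if pvCell field r (j - dc) = '*' ∧ (0 ≤ r + dr ∧ r + dr < n) ∧ r + dr = i
             then (1:Nat) else 0)
        = (fun r => if r = i - dr then
            (if pvCell field r (j - dc) = '*' then (1:Nat) else 0) else 0) := by
      funext r
      by_cases hr : r = i - dr
      · subst hr
        by_cases hP : pvCell field (i - dr) (j - dc) = '*'
        · rw [if_pos ⟨hP, ⟨by omega, by omega⟩, by omega⟩, if_pos rfl, if_pos hP]
        · rw [if_neg (fun h => hP h.1), if_pos rfl, if_neg hP]
      · rw [if_neg (by intro h; exact hr (by omega)), if_neg hr]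
    rw [e2, pvDelta]
    unfold pvAtom
    by_cases hr : 0 ≤ i - dr ∧ i - dr < n
    · rw [if_pos hr]
      by_cases hP : pvCell field (i - dr) (j - dc) = '*'
      · rw [if_pos hP, if_pos ⟨by omega, by omega, by omega, by omega,
          by rw [show i + -dr = i - dr by ring, show j + -dc = j - dc by ring]; exact hP⟩]
      · rw [if_neg hP, if_neg (by
          rw [show i + -dr = i - dr by ring, show j + -dc = j - dc by ring]
          intro h; exact hP h.2.2.2.2)]
    · rw [if_neg hr, if_neg (by omega)]
  · simp only [if_neg hb]
    unfold pvAtom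
    rw [if_neg (by intro h; exact hb ⟨by omega, by omega⟩)]
    simp

-- A's 8-direction loop is the sum of its gather atoms
lemma pvASide (field : List String) (n m i j : Int) :
    cnt field i j n m =
      ((pvAtom field n m i j (-1) 0 + pvAtom field n m i j 1 0 +
        pvAtom field n m i j 0 (-1) + pvAtom field n m i j 0 1 +
        pvAtom field n m i j (-1) (-1) + pvAtom field n m i j (-1) 1 +
        pvAtom field n m i j 1 (-1) + pvAtom field n m i j 1 1 : Nat) : Int) := by
  unfold cnt
  rw [PySem.List.foldl_ite_add_one]
  simp only [pvDirs, List.countP_cons, List.countP_nil, pvAtom, decide_eq_true_eq]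
  push_cast
  ring

lemma pvCnt1 (C : Prop) [Decidable C] (a b : Int) (p : Int × Int) :
    List.count (a, b) (if C then [p] else []) = if C ∧ p.1 = a ∧ p.2 = b then 1 else 0 := by
  by_cases h : C
  · rcases p with ⟨x, y⟩
    simp [h, List.count_cons, Prod.ext_iff]
  · simp [h]

-- B's bump multiplicity at a non-mine cell is the same sum of gather atoms
lemma pvBSide (field : List String) (n m i j : Int)
    (hi : 0 ≤ i ∧ i < n) (hj : 0 ≤ j ∧ j < m) (hm : pvCell field i j ≠ '*') :
    (pvBumps field n m).count (i, j) =
      pvAtom field n m i j 1 1 + pvAtom field n m i j 1 0 + pvAtom field n m i j 1 (-1) +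
      pvAtom field n m i j 0 1 + pvAtom field n m i j 0 (-1) +
      pvAtom field n m i j (-1) 1 + pvAtom field n m i j (-1) 0 + pvAtom field n m i j (-1) (-1) := by
  have hcell : ∀ r c : Int,
      List.count ((i : Int), (j : Int)) (if pvCell field r c = '*' then
        pvOffs.flatMap (fun dr => pvOffs.flatMap (fun dc =>
          if 0 ≤ r + dr ∧ r + dr < n ∧ 0 ≤ c + dc ∧ c + dc < m
          then [(r + dr, c + dc)] else []))
      else []) =
      pvT field n m i j (-1) (-1) r c + (pvT field n m i j (-1) 0 r c +
        (pvT field n m i j (-1) 1 r c + (pvT field n m i j 0 (-1) r c +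
        (pvT field n m i j 0 0 r c + (pvT field n m i j 0 1 r c +
        (pvT field n m i j 1 (-1) r c + (pvT field n m i j 1 0 r c +
        (pvT field n m i j 1 1 r c + 0)))))))) := by
    intro r c
    by_cases hmc : pvCell field r c = '*'
    · rw [if_pos hmc]
      simp only [pvOffs, List.flatMap_cons, List.flatMap_nil, List.append_nil,
        List.count_append, pvCnt1, pvT, hmc, true_and]
      ring
    · rw [if_neg hmc]
      simp [pvT, hmc]
  unfold pvBumps
  rw [List.count_flatMap]
  simp only [Function.comp_def, List.count_flatMap, hcell, List.sum_map_add]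
  rw [pvColSum field n m i j (-1) (-1) hi hj, pvColSum field n m i j (-1) 0 hi hj,
    pvColSum field n m i j (-1) 1 hi hj, pvColSum field n m i j 0 (-1) hi hj,
    pvColSum field n m i j 0 0 hi hj, pvColSum field n m i j 0 1 hi hj,
    pvColSum field n m i j 1 (-1) hi hj, pvColSum field n m i j 1 0 hi hj,
    pvColSum field n m i j 1 1 hi hj]
  have h00 : pvAtom field n m i j (-0) (-0) = 0 := by
    simp [pvAtom, hm]
  rw [h00]
  norm_num
  ring

-- per-cell agreement: A's gathered count = B's scattered tally
lemma pvCellEq (field : List String) (n m i j : Int)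
    (hi : 0 ≤ i ∧ i < n) (hj : 0 ≤ j ∧ j < m) (hm : pvCell field i j ≠ '*') :
    cnt field i j n m = ((pvBumps field n m).count (i, j) : Int) := by
  rw [pvASide, pvBSide field n m i j hi hj hm]; push_cast; ring

-- ===== VERDICT (by name: the statement is the Claim_ definition above) =====
theorem solve_spec : Claim_equal_solve := by
  intro field n m _ _
  show solve field n m = solve_alt field n m
  unfold solve solve_alt
  simp only [PySem.List.foldl_append_singleton_eq_map, List.nil_append]
  apply List.map_congr_left
  intro i hi
  rw [PySem.List.mem_pyRange_one] at hi
  congr 1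
  apply List.map_congr_left
  intro j hj
  rw [PySem.List.mem_pyRange_one] at hj
  by_cases hm : pvCell field i j = '*'
  · simp [hm]
  · rw [if_neg hm, if_neg hm]
    congr 1
    rw [PySem.Dict.getD_foldl_insert_add_one, PySem.Dict.getD_empty, zero_add]
    exact pvCellEq field n m i j hi hj hm
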